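-- pv_equiv track=rewrite | github.com/xumoremore/container-num-OCR | get_container_num.py | container_num_check
-- ===== SOURCE A (Python) =====
-- def container_num_check( masterid, boxid, checknum ):
--     """
--     :param masterid: 要保证是四位大写字母
--     :param boxid:  要保证是六位数字
--     :param checknum:  要保证是一位数字
--     :return:
--     """
--     try:
--         if (not masterid.encode('utf-8').isupper()) and len(masterid) != 4 :
--             return False
--         if not boxid.isdigit() and len(boxid) != 6 :
--             return False
--         if not checknum.isdigit() and len(checknum) != 1:
--             return False
--         the_sum = 0
--         equal_value_table = {'A':10, 'B':12, "C":13, "D":14, "E":15, "F":16, "G":17,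
--                              "H":18, "I":19, "J":20, "K":21, "L":23, "M":24, "N":25,
--                              "O":26, "P":27, "Q":28, "R":29, "S":30, "T":31, "U":32,
--                              "V":34, "W":35, "X":36, "Y":37, "Z":38, "0":0, "1":1,
--                              "2":2, "3":3, "4":4, "5":5, "6":6, "7":7, "8":8, "9":9}
--         container_num_str = masterid + boxid
--         for index, container_char in enumerate(container_num_str):
--             the_sum += equal_value_table[container_char] * ( 2**index )
--         remainder = the_sum%11
--         #10=0
--         if remainder == int(checknum) or remainder == int(checknum) + 10:
--             return True
--         else:
--             return False
--     except:
--         return False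
-- ===== SOURCE B (Python) =====
-- def container_num_check(masterid, boxid, checknum):
--     if (not masterid.encode('utf-8').isupper()) and len(masterid) != 4:
--         return False
--     if not boxid.isdigit() and len(boxid) != 6:
--         return False
--     if not checknum.isdigit() and len(checknum) != 1:
--         return False
--     try:
--         check = int(checknum)
--     except ValueError:
--         return False
--     # Horner evaluation of the reversed code in base 2, reduced mod 11 at every
--     # step: no powers of two, no lookup table, and no big intermediate sum.
--     remainder = 0
--     for c in reversed(masterid + boxid):
--         o = ord(c)
--         if 48 <= o <= 57:                # digit: its value
--             v = o - 48
--         elif 65 <= o <= 90:              # letter: ISO 6346 values skip multiples of 11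
--             k = o - 65
--             v = k + 10 + (k + 9) // 10
--         else:
--             return False
--         remainder = (remainder * 2 + v) % 11
--     return remainder == check or remainder == check + 10
-- ===== Notes on version B (the rewrite author's own statement) =====
-- stated objective: alternative
-- what changed: B replaces the enumerate loop that sums table[c]*2**index into a big total with a Horner evaluation of the REVERSED code kept reduced mod 11 at every step (remainder = (remainder*2 + v) % 11), computes character values arithmetically from the code instead of the 36-entry dict, and parses the check digit once up front; invalid characters return False directly instead of raising KeyError into the bare except.
import Mathlib
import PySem

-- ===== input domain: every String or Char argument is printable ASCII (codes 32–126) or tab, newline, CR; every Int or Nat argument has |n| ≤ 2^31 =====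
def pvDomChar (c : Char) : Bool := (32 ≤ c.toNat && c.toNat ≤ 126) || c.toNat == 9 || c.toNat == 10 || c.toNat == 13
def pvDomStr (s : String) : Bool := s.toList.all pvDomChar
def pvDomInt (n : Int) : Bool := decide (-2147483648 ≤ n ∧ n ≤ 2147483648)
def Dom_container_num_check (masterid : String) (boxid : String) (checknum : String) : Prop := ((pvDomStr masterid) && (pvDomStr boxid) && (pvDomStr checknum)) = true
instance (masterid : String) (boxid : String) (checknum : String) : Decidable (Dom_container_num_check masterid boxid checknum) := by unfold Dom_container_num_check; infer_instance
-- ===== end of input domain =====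

-- B replaces A's enumerate/2**index/dict-lookup summation by a Horner evaluation of the
-- reversed code reduced mod 11 at every step, with character values computed arithmetically
-- (objective: alternative).

set_option maxRecDepth 100000

-- shared guard helper: s.encode('utf-8').isupper() — bytes.isupper: at least one cased byte and
-- no lowercase byte.  Hand port, exact on the ASCII domain (both Pythons contain the identical
-- guard line).
def pvBytesIsupper (cs : List Char) : Bool :=
  cs.any (fun c => ('A' ≤ c && c ≤ 'Z') || ('a' ≤ c && c ≤ 'z')) &&
  cs.all (fun c => !('a' ≤ c && c ≤ 'z'))

-- ===== PORT A =====
-- the equal_value_table dict literal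
def pvTable : PySem.Dict Char Int := PySem.Dict.ofList
  [('A',10), ('B',12), ('C',13), ('D',14), ('E',15), ('F',16), ('G',17),
   ('H',18), ('I',19), ('J',20), ('K',21), ('L',23), ('M',24), ('N',25),
   ('O',26), ('P',27), ('Q',28), ('R',29), ('S',30), ('T',31), ('U',32),
   ('V',34), ('W',35), ('X',36), ('Y',37), ('Z',38), ('0',0), ('1',1),
   ('2',2), ('3',3), ('4',4), ('5',5), ('6',6), ('7',7), ('8',8), ('9',9)]

-- equal_value_table[container_char]; `none` = KeyError (caught by A's bare except)
def pvTableGet (c : Char) : Option Int := pvTable.get? c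

-- the `for index, container_char in enumerate(...)` accumulation loop of A
def pvALoop (s : List Char) (index : Nat) (the_sum : Int) : Option Int :=
  match s with
  | [] => some the_sum
  | ch :: rest =>
    match pvTableGet ch with
    | none => none
    | some v => pvALoop rest (index + 1) (the_sum + v * 2 ^ index)

def container_num_check (masterid : String) (boxid : String) (checknum : String) : Bool :=
  let ml := masterid.toList; let bl := boxid.toList; let cl := checknum.toList
  if (!pvBytesIsupper ml) && !(ml.length == 4) then false
  else if (!PySem.Chars.strIsdigit bl) && !(bl.length == 6) then false
  else if (!PySem.Chars.strIsdigit cl) && !(cl.length == 1) then false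
  else
    match pvALoop (ml ++ bl) 0 0 with
    | none => false  -- KeyError → except → False
    | some the_sum =>
      match PySem.Int.ofChars? cl with
      | none => false  -- ValueError in int(checknum) → except → False
      | some k =>
        let remainder := PySem.Int.mod the_sum 11
        if remainder == k || remainder == k + 10 then true else false

-- ===== PORT B =====
-- B's Horner loop over the REVERSED code: remainder = (remainder*2 + v) % 11 each step,
-- the value v computed from ord(c) (Nat arithmetic is exact here: operands nonnegative,
-- so Python's // is Nat division); `none` = B's `return False` on an invalid character.
def pvBLoop (s : List Char) (remainder : Int) : Option Int :=
  match s with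
  | [] => some remainder
  | ch :: rest =>
    let o := ch.toNat
    if 48 ≤ o && o ≤ 57 then
      pvBLoop rest (PySem.Int.mod (remainder * 2 + ((o - 48 : Nat) : Int)) 11)
    else if 65 ≤ o && o ≤ 90 then
      let k := o - 65
      pvBLoop rest (PySem.Int.mod (remainder * 2 + ((k + 10 + (k + 9) / 10 : Nat) : Int)) 11)
    else none

def container_num_check_alt (masterid : String) (boxid : String) (checknum : String) : Bool :=
  let ml := masterid.toList; let bl := boxid.toList; let cl := checknum.toList
  if (!pvBytesIsupper ml) && !(ml.length == 4) then false
  else if (!PySem.Chars.strIsdigit bl) && !(bl.length == 6) then false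
  else if (!PySem.Chars.strIsdigit cl) && !(cl.length == 1) then false
  else
    match PySem.Int.ofChars? cl with
    | none => false  -- int(checknum) raised ValueError → return False
    | some check =>
      match pvBLoop (ml ++ bl).reverse 0 with
      | none => false  -- invalid character → return False
      | some remainder => remainder == check || remainder == check + 10

-- ===== PRECONDITION & SPEC =====
def Spec_container_num_check (masterid : String) (boxid : String) (checknum : String) (out : Bool) : Prop := out = container_num_check_alt masterid boxid checknum
instance (masterid : String) (boxid : String) (checknum : String) (out : Bool) : Decidable (Spec_container_num_check masterid boxid checknum out) := by unfold Spec_container_num_check; infer_instance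

-- ===== CLAIM (what is proved, stated in full; the proofs are below) =====
def Claim_equal_container_num_check : Prop := ∀ (masterid : String) (boxid : String) (checknum : String), Dom_container_num_check masterid boxid checknum → Spec_container_num_check masterid boxid checknum (container_num_check masterid boxid checknum)

-- ===== LEMMAS AND PROOFS =====

-- proof-only: the per-character value as an Option, and its list version
def pvVal (c : Char) : Option Int :=
  if 48 ≤ c.toNat && c.toNat ≤ 57 then some ((c.toNat - 48 : Nat) : Int)
  else if 65 ≤ c.toNat && c.toNat ≤ 90 then
    some ((c.toNat - 65 + 10 + (c.toNat - 65 + 9) / 10 : Nat) : Int)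
  else none

def pvVals (s : List Char) : Option (List Int) :=
  match s with
  | [] => some []
  | c :: rest =>
    match pvVal c with
    | none => none
    | some v => (pvVals rest).map (v :: ·)

-- the weighted sum sum_i l[i] * 2^i, written front-first
def pvWsum (l : List Int) : Int := l.foldr (fun v r => v + 2 * r) 0

theorem pvCharEqOfToNat {c d : Char} (h : c.toNat = d.toNat) : c = d :=
  Char.ext (UInt32.toNat_inj.mp h)

-- A's table lookup characterised by the character code
theorem pvTableGet_eq (ch : Char) : pvTableGet ch = pvVal ch := by
  by_cases h0 : ch = 'A'
  · subst h0; decide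
  by_cases h1 : ch = 'B'
  · subst h1; decide
  by_cases h2 : ch = 'C'
  · subst h2; decide
  by_cases h3 : ch = 'D'
  · subst h3; decide
  by_cases h4 : ch = 'E'
  · subst h4; decide
  by_cases h5 : ch = 'F'
  · subst h5; decide
  by_cases h6 : ch = 'G'
  · subst h6; decide
  by_cases h7 : ch = 'H'
  · subst h7; decide
  by_cases h8 : ch = 'I'
  · subst h8; decide
  by_cases h9 : ch = 'J'
  · subst h9; decide
  by_cases h10 : ch = 'K'
  · subst h10; decide
  by_cases h11 : ch = 'L'
  · subst h11; decide
  by_cases h12 : ch = 'M'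
  · subst h12; decide
  by_cases h13 : ch = 'N'
  · subst h13; decide
  by_cases h14 : ch = 'O'
  · subst h14; decide
  by_cases h15 : ch = 'P'
  · subst h15; decide
  by_cases h16 : ch = 'Q'
  · subst h16; decide
  by_cases h17 : ch = 'R'
  · subst h17; decide
  by_cases h18 : ch = 'S'
  · subst h18; decide
  by_cases h19 : ch = 'T'
  · subst h19; decide
  by_cases h20 : ch = 'U'
  · subst h20; decide
  by_cases h21 : ch = 'V'
  · subst h21; decide
  by_cases h22 : ch = 'W'
  · subst h22; decide
  by_cases h23 : ch = 'X'
  · subst h23; decide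
  by_cases h24 : ch = 'Y'
  · subst h24; decide
  by_cases h25 : ch = 'Z'
  · subst h25; decide
  by_cases h26 : ch = '0'
  · subst h26; decide
  by_cases h27 : ch = '1'
  · subst h27; decide
  by_cases h28 : ch = '2'
  · subst h28; decide
  by_cases h29 : ch = '3'
  · subst h29; decide
  by_cases h30 : ch = '4'
  · subst h30; decide
  by_cases h31 : ch = '5'
  · subst h31; decide
  by_cases h32 : ch = '6'
  · subst h32; decide
  by_cases h33 : ch = '7'
  · subst h33; decide
  by_cases h34 : ch = '8'
  · subst h34; decide
  by_cases h35 : ch = '9'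
  · subst h35; decide
  have n0 : ch.toNat ≠ 65 := fun hh => h0 (pvCharEqOfToNat hh)
  have n1 : ch.toNat ≠ 66 := fun hh => h1 (pvCharEqOfToNat hh)
  have n2 : ch.toNat ≠ 67 := fun hh => h2 (pvCharEqOfToNat hh)
  have n3 : ch.toNat ≠ 68 := fun hh => h3 (pvCharEqOfToNat hh)
  have n4 : ch.toNat ≠ 69 := fun hh => h4 (pvCharEqOfToNat hh)
  have n5 : ch.toNat ≠ 70 := fun hh => h5 (pvCharEqOfToNat hh)
  have n6 : ch.toNat ≠ 71 := fun hh => h6 (pvCharEqOfToNat hh)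
  have n7 : ch.toNat ≠ 72 := fun hh => h7 (pvCharEqOfToNat hh)
  have n8 : ch.toNat ≠ 73 := fun hh => h8 (pvCharEqOfToNat hh)
  have n9 : ch.toNat ≠ 74 := fun hh => h9 (pvCharEqOfToNat hh)
  have n10 : ch.toNat ≠ 75 := fun hh => h10 (pvCharEqOfToNat hh)
  have n11 : ch.toNat ≠ 76 := fun hh => h11 (pvCharEqOfToNat hh)
  have n12 : ch.toNat ≠ 77 := fun hh => h12 (pvCharEqOfToNat hh)
  have n13 : ch.toNat ≠ 78 := fun hh => h13 (pvCharEqOfToNat hh)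
  have n14 : ch.toNat ≠ 79 := fun hh => h14 (pvCharEqOfToNat hh)
  have n15 : ch.toNat ≠ 80 := fun hh => h15 (pvCharEqOfToNat hh)
  have n16 : ch.toNat ≠ 81 := fun hh => h16 (pvCharEqOfToNat hh)
  have n17 : ch.toNat ≠ 82 := fun hh => h17 (pvCharEqOfToNat hh)
  have n18 : ch.toNat ≠ 83 := fun hh => h18 (pvCharEqOfToNat hh)
  have n19 : ch.toNat ≠ 84 := fun hh => h19 (pvCharEqOfToNat hh)
  have n20 : ch.toNat ≠ 85 := fun hh => h20 (pvCharEqOfToNat hh)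
  have n21 : ch.toNat ≠ 86 := fun hh => h21 (pvCharEqOfToNat hh)
  have n22 : ch.toNat ≠ 87 := fun hh => h22 (pvCharEqOfToNat hh)
  have n23 : ch.toNat ≠ 88 := fun hh => h23 (pvCharEqOfToNat hh)
  have n24 : ch.toNat ≠ 89 := fun hh => h24 (pvCharEqOfToNat hh)
  have n25 : ch.toNat ≠ 90 := fun hh => h25 (pvCharEqOfToNat hh)
  have n26 : ch.toNat ≠ 48 := fun hh => h26 (pvCharEqOfToNat hh)
  have n27 : ch.toNat ≠ 49 := fun hh => h27 (pvCharEqOfToNat hh)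
  have n28 : ch.toNat ≠ 50 := fun hh => h28 (pvCharEqOfToNat hh)
  have n29 : ch.toNat ≠ 51 := fun hh => h29 (pvCharEqOfToNat hh)
  have n30 : ch.toNat ≠ 52 := fun hh => h30 (pvCharEqOfToNat hh)
  have n31 : ch.toNat ≠ 53 := fun hh => h31 (pvCharEqOfToNat hh)
  have n32 : ch.toNat ≠ 54 := fun hh => h32 (pvCharEqOfToNat hh)
  have n33 : ch.toNat ≠ 55 := fun hh => h33 (pvCharEqOfToNat hh)
  have n34 : ch.toNat ≠ 56 := fun hh => h34 (pvCharEqOfToNat hh)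
  have n35 : ch.toNat ≠ 57 := fun hh => h35 (pvCharEqOfToNat hh)
  rw [show pvTableGet ch = none from by
    simp [pvTableGet, pvTable, PySem.Dict.ofList, PySem.Dict.update, List.foldl,
          PySem.Dict.get?_insert, PySem.Dict.get?_empty, h0, h1, h2, h3, h4, h5, h6, h7, h8, h9, h10, h11, h12, h13, h14, h15, h16, h17, h18, h19, h20, h21, h22, h23, h24, h25, h26, h27, h28, h29, h30, h31, h32, h33, h34, h35]]
  rw [pvVal, if_neg (by simp; omega), if_neg (by simp; omega)]

-- A's loop = the value list plus a weighted sum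
theorem pvALoop_eq (s : List Char) (i : Nat) (acc : Int) :
    pvALoop s i acc = (pvVals s).map (fun l => acc + 2 ^ i * pvWsum l) := by
  induction s generalizing i acc with
  | nil => simp [pvALoop, pvVals, pvWsum]
  | cons ch rest ih =>
    simp only [pvALoop, pvVals, pvTableGet_eq ch]
    cases pvVal ch with
    | none => rfl
    | some v =>
      simp only [ih]
      cases pvVals rest with
      | none => rfl
      | some l =>
        simp only [Option.map_some]
        congr 1
        simp [pvWsum, pow_succ]
        ring

-- B's loop on an appended list
theorem pvBLoop_append (xs ys : List Char) (r : Int) :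
    pvBLoop (xs ++ ys) r = (pvBLoop xs r).bind (fun r' => pvBLoop ys r') := by
  induction xs generalizing r with
  | nil => rfl
  | cons c rest ih =>
    simp only [List.cons_append, pvBLoop]
    split_ifs <;> simp [ih]

-- B's Horner fold over the value list (proof-only restatement of the loop)
def pvHorner (r : Int) (l : List Int) : Int :=
  match l with
  | [] => r
  | v :: t => PySem.Int.mod (pvHorner r t * 2 + v) 11

-- B's loop on the reversed string, characterised by the value list in front order
theorem pvBLoop_reverse (s : List Char) (r : Int) :
    pvBLoop s.reverse r = (pvVals s).map (pvHorner r) := by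
  induction s generalizing r with
  | nil => simp [pvBLoop, pvVals, pvHorner]
  | cons c rest ih =>
    simp only [List.reverse_cons, pvBLoop_append, ih, pvVals]
    cases h : pvVal c with
    | none =>
      cases pvVals rest with
      | none => rfl
      | some l =>
        simp only [Option.map_some, Option.bind_some]
        simp only [pvBLoop, pvVal] at h ⊢
        split_ifs at h ⊢ <;> simp_all
    | some v =>
      cases pvVals rest with
      | none => rfl
      | some l =>
        simp only [Option.map_some, Option.bind_some, pvHorner]
        simp only [pvBLoop, pvVal] at h ⊢
        split_ifs at h ⊢ <;> simp_all

-- Horner with step-wise mod computes the weighted sum mod 11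
theorem pvHorner_eq (l : List Int) : pvHorner 0 l = PySem.Int.mod (pvWsum l) 11 := by
  induction l with
  | nil => simp [pvHorner, pvWsum, PySem.Int.mod]
  | cons v t ih =>
    have hw : pvWsum (v :: t) = pvWsum t * 2 + v := by simp only [pvWsum, List.foldr]; ring
    rw [pvHorner, ih, hw,
        PySem.Int.mod_eq_emod_of_pos (by norm_num),
        PySem.Int.mod_eq_emod_of_pos (by norm_num),
        PySem.Int.mod_eq_emod_of_pos (by norm_num)]
    conv_lhs => rw [Int.add_emod, Int.mul_emod, Int.emod_emod_of_dvd _ (dvd_refl 11)]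
    conv_rhs => rw [Int.add_emod, Int.mul_emod]

-- ===== VERDICT (by name: the statement is the Claim_ definition above) =====
theorem container_num_check_spec : Claim_equal_container_num_check := by
  intro masterid boxid checknum _
  unfold Spec_container_num_check container_num_check container_num_check_alt
  dsimp only
  split_ifs
  · rfl
  · rfl
  · rfl
  rw [pvALoop_eq, pvBLoop_reverse]
  cases hk : PySem.Int.ofChars? checknum.toList <;>
    cases hv : pvVals (masterid.toList ++ boxid.toList) <;>
      simp [pvHorner_eq, Bool.beq_eq_decide_eq]
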